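-- pv_equiv track=rewrite | github.com/Shiv2157k/leet_code | revisited/greedy/best_time_to_buy_stock.py | get_max_profit_for_multiple_transactions_
-- ===== SOURCE A (Python) =====
-- from typing import List
--
-- def get_max_profit_for_multiple_transactions_(prices: List[int]) -> int:
--     """
--     Approach: Peak Valley
--     Time Complexity: O(N)
--     Space Complexity: O(1)
--     :param prices:
--     :return:
--     """
--     i = max_profit = 0
--
--     while i < len(prices) - 1:
--         while i < len(prices) - 1 and prices[i] >= prices[i + 1]:
--             i += 1
--         valley = prices[i]
--         while i < len(prices) - 1 and prices[i] <= prices[i + 1]: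
--             i += 1
--         peak = prices[i]
--         max_profit += peak - valley
--     return max_profit
-- ===== SOURCE B (Python) =====
-- from typing import List
--
-- def get_max_profit_for_multiple_transactions_(prices: List[int]) -> int:
--     total = 0
--     for a, b in zip(prices, prices[1:]):
--         if a < b:
--             total += b - a
--     return total
-- ===== Notes on version B (the rewrite author's own statement) =====
-- stated objective: idiomatic
-- what changed: Replaces the nested valley/peak while-loops with index state by a single flat pass over adjacent pairs that accumulates every positive consecutive difference.
import Mathlib
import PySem

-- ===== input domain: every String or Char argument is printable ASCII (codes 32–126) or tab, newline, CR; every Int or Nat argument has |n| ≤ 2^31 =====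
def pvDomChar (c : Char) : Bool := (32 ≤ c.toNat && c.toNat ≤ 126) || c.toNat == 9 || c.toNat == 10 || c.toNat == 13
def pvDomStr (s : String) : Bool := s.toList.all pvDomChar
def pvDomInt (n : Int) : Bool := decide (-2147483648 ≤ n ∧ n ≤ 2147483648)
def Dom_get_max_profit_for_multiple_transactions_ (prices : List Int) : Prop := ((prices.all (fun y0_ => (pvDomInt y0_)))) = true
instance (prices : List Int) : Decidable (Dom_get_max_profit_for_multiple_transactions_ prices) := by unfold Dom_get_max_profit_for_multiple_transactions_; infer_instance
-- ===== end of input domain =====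

-- B replaces A's nested valley/peak scanning by one flat pass summing positive adjacent differences (idiomatic, same O(n) cost).

-- ===== PORT A =====
-- inner while: advance i while prices[i] >= prices[i+1]
def skipDownA (prices : List Int) (i : Nat) : Nat :=
  if i < prices.length - 1 ∧ prices.getD (i+1) 0 ≤ prices.getD i 0 then
    skipDownA prices (i+1)
  else i
termination_by prices.length - 1 - i

-- inner while: advance i while prices[i] <= prices[i+1]
def skipUpA (prices : List Int) (i : Nat) : Nat :=
  if i < prices.length - 1 ∧ prices.getD i 0 ≤ prices.getD (i+1) 0 then
    skipUpA prices (i+1)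
  else i
termination_by prices.length - 1 - i

-- outer while loop; fuel = prices.length is always enough since i strictly increases
def outerA (prices : List Int) : Nat → Nat → Int → Int
  | 0, _, profit => profit
  | fuel+1, i, profit =>
    if i < prices.length - 1 then
      let i1 := skipDownA prices i
      let valley := prices.getD i1 0
      let i2 := skipUpA prices i1
      let peak := prices.getD i2 0
      outerA prices fuel i2 (profit + (peak - valley))
    else profit

def get_max_profit_for_multiple_transactions_ (prices : List Int) : Int :=
  outerA prices prices.length 0 0

-- ===== PORT B =====
def get_max_profit_for_multiple_transactions__alt (prices : List Int) : Int :=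
  (prices.zip (prices.drop 1)).foldl
    (fun acc p => if p.1 < p.2 then acc + (p.2 - p.1) else acc) 0

-- ===== PRECONDITION & SPEC =====
def Spec_get_max_profit_for_multiple_transactions_ (prices : List Int) (out : Int) : Prop := out = get_max_profit_for_multiple_transactions__alt prices
instance (prices : List Int) (out : Int) : Decidable (Spec_get_max_profit_for_multiple_transactions_ prices out) := by unfold Spec_get_max_profit_for_multiple_transactions_; infer_instance

-- ===== CLAIM (what is proved, stated in full; the proofs are below) =====
def Claim_equal_get_max_profit_for_multiple_transactions_ : Prop := ∀ (prices : List Int), Dom_get_max_profit_for_multiple_transactions_ prices → Spec_get_max_profit_for_multiple_transactions_ prices (get_max_profit_for_multiple_transactions_ prices)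

-- ===== LEMMAS AND PROOFS =====

-- the positive part of the step at index j
def dP (prices : List Int) (j : Nat) : Int :=
  if prices.getD j 0 < prices.getD (j+1) 0 then prices.getD (j+1) 0 - prices.getD j 0 else 0

-- sum of positive steps from index i on
def SP (prices : List Int) (i : Nat) : Int :=
  if i < prices.length - 1 then dP prices i + SP prices (i+1) else 0
termination_by prices.length - 1 - i

-- structural version of the same sum
def pairSum : List Int → Int
  | a :: b :: t => (if a < b then b - a else 0) + pairSum (b :: t)
  | _ => 0

lemma foldB_eq (l : List Int) : ∀ acc : Int,
    (l.zip (l.drop 1)).foldl (fun acc p => if p.1 < p.2 then acc + (p.2 - p.1) else acc) acc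
      = acc + pairSum l := by
  induction l with
  | nil => intro acc; simp [pairSum]
  | cons a t ih =>
    intro acc
    cases t with
    | nil => simp [pairSum]
    | cons b t' =>
      have step := ih (if a < b then acc + (b - a) else acc)
      simp only [List.drop_succ_cons, List.drop_zero] at step ⊢
      simp only [List.zip_cons_cons, List.foldl_cons]
      rw [step, pairSum]
      split <;> ring

lemma SP_eq_pairSum (prices : List Int) (i : Nat) :
    SP prices i = pairSum (prices.drop i) := by
  fun_induction SP prices i with
  | case1 i h ih =>
    have h1 : i < prices.length := by omega
    have h2 : i + 1 < prices.length := by omega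
    rw [List.drop_eq_getElem_cons h1, List.drop_eq_getElem_cons h2, pairSum,
      ← List.drop_eq_getElem_cons h2, ih, dP,
      List.getD_eq_getElem _ _ h1, List.getD_eq_getElem _ _ h2]
  | case2 i h =>
    have hlen : (prices.drop i).length ≤ 1 := by
      simp only [List.length_drop]; omega
    match hd : prices.drop i with
    | [] => rfl
    | [a] => rfl
    | a :: b :: t => rw [hd] at hlen; simp at hlen

lemma skipDownA_ge (prices : List Int) (i : Nat) : i ≤ skipDownA prices i := by
  fun_induction skipDownA prices i with
  | case1 i h ih => omega
  | case2 i h => omega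

lemma skipUpA_ge (prices : List Int) (i : Nat) : i ≤ skipUpA prices i := by
  fun_induction skipUpA prices i with
  | case1 i h ih => omega
  | case2 i h => omega

lemma skipDownA_SP (prices : List Int) (i : Nat) :
    SP prices (skipDownA prices i) = SP prices i := by
  fun_induction skipDownA prices i with
  | case1 i h ih =>
    conv_rhs => rw [SP, if_pos h.1]
    rw [ih, dP, if_neg (not_lt.mpr h.2)]
    ring
  | case2 i h => rfl

lemma skipUpA_SP (prices : List Int) (i : Nat) :
    SP prices i
      = (prices.getD (skipUpA prices i) 0 - prices.getD i 0) + SP prices (skipUpA prices i) := by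
  fun_induction skipUpA prices i with
  | case1 i h ih =>
    rw [SP, if_pos h.1, ih, dP]
    split <;> omega
  | case2 i h => ring

lemma advanceA (prices : List Int) (i : Nat) (h : i < prices.length - 1) :
    i + 1 ≤ skipUpA prices (skipDownA prices i) := by
  rw [skipDownA]
  split
  · rename_i hc
    calc i + 1 ≤ skipDownA prices (i+1) := skipDownA_ge prices (i+1)
      _ ≤ skipUpA prices (skipDownA prices (i+1)) := skipUpA_ge _ _
  · rename_i hc
    have hle : prices.getD i 0 ≤ prices.getD (i+1) 0 := by
      by_contra hlt
      exact hc ⟨h, by omega⟩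
    rw [skipUpA, if_pos ⟨h, hle⟩]
    exact skipUpA_ge prices (i+1)

lemma outerA_eq (prices : List Int) :
    ∀ (fuel i : Nat) (profit : Int), prices.length - 1 ≤ i + fuel →
      outerA prices fuel i profit = profit + SP prices i := by
  intro fuel
  induction fuel with
  | zero =>
    intro i profit hb
    rw [outerA, SP, if_neg (by omega)]
    ring
  | succ f ih =>
    intro i profit hb
    rw [outerA]
    split
    · rename_i h
      have hadv := advanceA prices i h
      rw [ih _ _ (by omega)]
      have h1 := skipDownA_SP prices i
      have h2 := skipUpA_SP prices (skipDownA prices i)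
      omega
    · rename_i h
      rw [SP, if_neg h]
      ring

-- ===== VERDICT (by name: the statement is the Claim_ definition above) =====
theorem get_max_profit_for_multiple_transactions__spec : Claim_equal_get_max_profit_for_multiple_transactions_ := by
  intro prices _
  unfold Spec_get_max_profit_for_multiple_transactions_
  unfold get_max_profit_for_multiple_transactions_ get_max_profit_for_multiple_transactions__alt
  rw [outerA_eq prices prices.length 0 0 (by omega), foldB_eq prices 0,
    SP_eq_pairSum prices 0, List.drop_zero]
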